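-- pv_equiv track=rewrite | github.com/byeongjulee222/problems | 프로그래머스/쿠팡_2020/1번.py | solution
-- ===== SOURCE A (Python) =====
-- def solution(N):
--     score = 1
--     for zin in range(2, 10):
--         num = N
--         Max = 1
--         while num:
--             if num % zin:
--                 Max *= (num % zin)
--             num = num // zin
--
--         if score <= Max:
--             score = Max
--             zinbub = zin
--
--     return [zinbub, score]
-- ===== SOURCE B (Python) =====
-- def nonzero_digit_product(n, b):
--     # Most-significant-first digit extraction: find the largest power of b
--     # not exceeding n, then peel digits top-down by division and subtraction.
--     p = 1
--     while p * b <= n: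
--         p *= b
--     prod = 1
--     while p >= 1:
--         d = n // p
--         if d:
--             prod *= d
--         n -= d * p
--         p //= b
--     return prod
--
--
-- def solution(N):
--     # max over (product, base) tuples: lexicographic comparison picks the
--     # maximal product and, among equal products, the largest base.
--     score, base = max((nonzero_digit_product(N, b), b) for b in range(2, 10))
--     return [base, score]
-- ===== Notes on version B (the rewrite author's own statement) =====
-- stated objective: alternative
-- what changed: B extracts digits most-significant-first by computing the largest power of the base and peeling digits via division and subtraction (instead of A's least-significant mod/floordiv loop), and selects the answer with a single max over (product, base) tuples instead of A's stateful <=-scan.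
import Mathlib
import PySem

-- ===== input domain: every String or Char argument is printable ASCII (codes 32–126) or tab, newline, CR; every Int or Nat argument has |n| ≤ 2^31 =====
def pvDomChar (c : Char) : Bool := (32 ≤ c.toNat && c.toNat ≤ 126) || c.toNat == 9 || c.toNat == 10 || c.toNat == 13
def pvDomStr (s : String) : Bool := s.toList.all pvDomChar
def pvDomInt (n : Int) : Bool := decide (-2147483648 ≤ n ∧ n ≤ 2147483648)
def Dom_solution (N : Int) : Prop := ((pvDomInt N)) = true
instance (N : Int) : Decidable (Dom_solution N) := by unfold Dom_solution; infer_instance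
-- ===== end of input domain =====

-- B extracts base-b digits most-significant-first (largest power of b, then divide
-- and subtract) and picks the answer with one max over (product, base) tuples,
-- instead of A's least-significant mod/floordiv loop with a stateful <=-scan.

-- used by the termination proofs of the loop ports
lemma pvEdivLt (a b : Int) (ha : 0 < a) (hb : 1 < b) : a / b < a := by
  have hd := Int.mul_ediv_add_emod a b
  have h1 : 0 ≤ a % b := Int.emod_nonneg a (by omega)
  have h2 : 0 ≤ a / b := Int.ediv_nonneg (le_of_lt ha) (by omega)
  nlinarith

-- ===== PORT A =====
-- Python's `while num:` loop; the `num ≤ 0 ∨ zin ≤ 1` guard only makes the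
-- recursion total (for num < 0 the Python loop diverges — excluded by Pre_;
-- zin is always 2..9 at call sites).
def loopA (zin num Max : Int) : Int :=
  if num ≤ 0 ∨ zin ≤ 1 then Max
  else
    let Max' := if PySem.Int.mod num zin ≠ 0 then Max * PySem.Int.mod num zin else Max
    loopA zin (PySem.Int.floordiv num zin) Max'
termination_by num.toNat
decreasing_by
  rename_i h
  rw [not_or] at h
  have : PySem.Int.floordiv num zin = num / zin := PySem.Int.floordiv_eq_ediv_of_pos (by omega)
  rw [this]
  have := pvEdivLt num zin (by omega) (by omega)
  have := Int.ediv_nonneg (by omega : (0:Int) ≤ num) (by omega : (0:Int) ≤ zin)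
  omega

-- zinbub is unassigned before the loop in Python; with N ≥ 0 (Pre_) the first
-- iteration always assigns it, so the initial 0 is never returned.
def solution (N : Int) : List Int :=
  let st := (PySem.List.pyRange 2 10 1).foldl
    (fun (st : Int × Int) zin =>
      let Max := loopA zin N 1
      if st.1 ≤ Max then (Max, zin) else st)
    (1, 0)
  [st.2, st.1]

-- ===== PORT B =====
-- `while p * b <= n: p *= b` of Source B; the `b ≤ 1 ∨ p ≤ 0` guard only makes the
-- recursion total (p starts at 1, b is 2..9 at call sites).
def powLoop (n b p : Int) : Int :=
  if b ≤ 1 ∨ p ≤ 0 then p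
  else if p * b ≤ n then powLoop n b (p * b) else p
termination_by (n - p).toNat
decreasing_by
  rename_i h h'
  rw [not_or] at h
  have h1 : p < p * b := by nlinarith [h.1, h.2]
  omega

-- `while p >= 1:` peeling loop of Source B (same kind of totality guard on b).
def peelLoop (b p n prod : Int) : Int :=
  if p < 1 ∨ b ≤ 1 then prod
  else
    let d := PySem.Int.floordiv n p
    peelLoop b (PySem.Int.floordiv p b) (n - d * p) (if d ≠ 0 then prod * d else prod)
termination_by p.toNat
decreasing_by
  rename_i h
  rw [not_or] at h
  have : PySem.Int.floordiv p b = p / b := PySem.Int.floordiv_eq_ediv_of_pos (by omega)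
  rw [this]
  have := pvEdivLt p b (by omega) (by omega)
  have := Int.ediv_nonneg (by omega : (0:Int) ≤ p) (by omega : (0:Int) ≤ b)
  omega

def nonzeroDigitProduct (n b : Int) : Int := peelLoop b (powLoop n b 1) n 1

-- Python's `max` over the (product, base) tuples: PySem.List.max2? with the two
-- tuple components as keys; the list is range(2,10), never empty, so the none
-- branch (Python max raising on an empty iterable) is unreachable.
def solution_alt (N : Int) : List Int :=
  match PySem.List.max2? ((PySem.List.pyRange 2 10 1).map
      (fun b => (nonzeroDigitProduct N b, b))) Prod.fst Prod.snd with
  | some m => [m.2, m.1]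
  | none => []

-- ===== PRECONDITION & SPEC =====
-- For N < 0 the Python while-loop of A never terminates (num // zin stalls at -1),
-- so A returns only for N ≥ 0.
def Pre_solution (N : Int) : Prop := 0 ≤ N
instance (N : Int) : Decidable (Pre_solution N) := by unfold Pre_solution; infer_instance

def pvWitness_solution : Int := (125)

def Spec_solution (N : Int) (out : List Int) : Prop := out = solution_alt N
instance (N : Int) (out : List Int) : Decidable (Spec_solution N out) := by unfold Spec_solution; infer_instance

-- ===== CLAIM (what is proved, stated in full; the proofs are below) =====
def Claim_equal_solution : Prop := ∀ (N : Int), Dom_solution N → Pre_solution N → Spec_solution N (solution N)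

-- ===== LEMMAS AND PROOFS =====

-- the mathematical product of the nonzero base-b digits of n
def specP (b n : Int) : Int :=
  if n ≤ 0 ∨ b ≤ 1 then 1
  else (if n % b ≠ 0 then n % b else 1) * specP b (n / b)
termination_by n.toNat
decreasing_by
  rename_i h
  rw [not_or] at h
  have := pvEdivLt n b (by omega) (by omega)
  have := Int.ediv_nonneg (by omega : (0:Int) ≤ n) (by omega : (0:Int) ≤ b)
  omega

lemma specP_pos_aux (k : Nat) : ∀ b n : Int, n.toNat ≤ k → 2 ≤ b → 1 ≤ specP b n := by
  induction k with
  | zero =>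
    intro b n hk hb
    rw [specP]; simp [(by omega : n ≤ 0 ∨ b ≤ 1)]
  | succ k ih =>
    intro b n hk hb
    rw [specP]
    by_cases hg : n ≤ 0 ∨ b ≤ 1
    · simp [hg]
    · rw [not_or] at hg
      rw [if_neg (by omega : ¬ (n ≤ 0 ∨ b ≤ 1))]
      have h1 : 0 ≤ n % b := Int.emod_nonneg n (by omega)
      have hlt := pvEdivLt n b (by omega) (by omega)
      have hge := Int.ediv_nonneg (by omega : (0:Int) ≤ n) (by omega : (0:Int) ≤ b)
      have hr : 1 ≤ specP b (n / b) := ih b (n / b) (by omega) hb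
      by_cases hz : n % b = 0
      · simp [hz]; omega
      · rw [if_pos hz]
        have h2 : 1 ≤ n % b := by omega
        nlinarith

lemma specP_pos (b n : Int) (hb : 2 ≤ b) : 1 ≤ specP b n :=
  specP_pos_aux n.toNat b n le_rfl hb

-- A's digit loop computes Max * specP
lemma loopA_eq_specP_aux (k : Nat) : ∀ zin num Max : Int, num.toNat ≤ k → 0 ≤ num →
    2 ≤ zin → loopA zin num Max = Max * specP zin num := by
  induction k with
  | zero =>
    intro zin num Max hk h0 h2
    rw [loopA, specP]
    simp [(by omega : num ≤ 0 ∨ zin ≤ 1)]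
  | succ k ih =>
    intro zin num Max hk h0 h2
    rw [loopA, specP]
    by_cases hg : num ≤ 0 ∨ zin ≤ 1
    · simp [hg]
    · rw [not_or] at hg
      rw [if_neg (by omega : ¬ (num ≤ 0 ∨ zin ≤ 1)), if_neg (by omega : ¬ (num ≤ 0 ∨ zin ≤ 1))]
      have hm : PySem.Int.mod num zin = num % zin := PySem.Int.mod_eq_emod_of_pos (by omega)
      have hd : PySem.Int.floordiv num zin = num / zin :=
        PySem.Int.floordiv_eq_ediv_of_pos (by omega)
      have hlt := pvEdivLt num zin (by omega) (by omega)
      have hge := Int.ediv_nonneg (by omega : (0:Int) ≤ num) (by omega : (0:Int) ≤ zin)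
      rw [hm, hd, ih zin (num / zin) _ (by omega) hge h2]
      by_cases hz : num % zin = 0 <;> simp [hz] <;> ring

-- the product of the nonzero digits of n below b, i.e. specP on 0 ≤ n < b
lemma specP_small (b : Int) (hb : 2 ≤ b) (d : Int) (hd1 : 0 ≤ d) (hd2 : d < b) :
    specP b d = if d ≠ 0 then d else 1 := by
  by_cases hdz : d = 0
  · subst hdz; rw [specP]; simp [(by omega : (0:Int) ≤ 0 ∨ b ≤ 1)]
  · rw [specP, if_neg (by omega : ¬ (d ≤ 0 ∨ b ≤ 1))]
    have h1 : d % b = d := Int.emod_eq_of_lt (by omega) hd2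
    have h2 : d / b = 0 := Int.ediv_eq_zero_of_lt (by omega) hd2
    rw [h1, h2, specP]
    simp [(by omega : (0:Int) ≤ 0 ∨ b ≤ 1), hdz]

-- top-digit split: peeling the digit at b^(k+1) off n
lemma specP_split (b : Int) (hb : 2 ≤ b) (k : Nat) :
    ∀ n : Int, 0 ≤ n → n < b ^ (k + 1) * b →
    specP b n = (if n / b ^ (k + 1) ≠ 0 then n / b ^ (k + 1) else 1) * specP b (n % b ^ (k + 1)) := by
  induction k with
  | zero =>
    intro n h0 hlt
    simp only [zero_add, pow_one] at h0 hlt ⊢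
    have hd0 : 0 ≤ n / b := Int.ediv_nonneg h0 (by omega)
    have hdb : n / b < b := Int.ediv_lt_of_lt_mul (by omega) hlt
    have hm0 : 0 ≤ n % b := Int.emod_nonneg n (by omega)
    have hmb : n % b < b := Int.emod_lt_of_pos n (by omega)
    by_cases hn : n = 0
    · subst hn
      rw [Int.zero_ediv, Int.zero_emod]
      norm_num
    · rw [specP, if_neg (by omega : ¬ (n ≤ 0 ∨ b ≤ 1))]
      rw [specP_small b hb (n / b) hd0 hdb, specP_small b hb (n % b) hm0 hmb]
      ring
  | succ k ih =>
    intro n h0 hlt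
    by_cases hn : n = 0
    · subst hn
      rw [Int.zero_ediv, Int.zero_emod]
      norm_num
    have hbpos : (0:Int) < b := by omega
    have hppos : (0:Int) < b ^ (k + 1) := pow_pos hbpos _
    have hqpos : (0:Int) < b ^ (k + 1 + 1) := pow_pos hbpos _
    have hnb0 : 0 ≤ n / b := Int.ediv_nonneg h0 (by omega)
    have hnb_lt : n / b < b ^ (k + 1) * b := by
      apply Int.ediv_lt_of_lt_mul hbpos
      calc n < b ^ (k + 1 + 1) * b := hlt
        _ = b ^ (k + 1) * b * b := by ring
    have hIH := ih (n / b) hnb0 hnb_lt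
    -- abbreviations
    set P : Int := b ^ (k + 1) with hP
    set M : Int := b ^ (k + 1 + 1) with hM
    have hMP : M = b * P := by rw [hM, hP]; ring
    have hr0 : 0 ≤ n % M := Int.emod_nonneg n (by omega)
    have hrM : n % M < M := Int.emod_lt_of_pos n (by omega)
    have hndecomp : n = M * (n / M) + n % M := (Int.ediv_add_emod n M).symm
    -- e1 : (n / b) / P = n / M
    have e1 : (n / b) / P = n / M := by
      rw [Int.ediv_ediv_eq_ediv_mul (by omega), hMP, mul_comm]
    -- e2 : (n / b) % P = (n % M) / b
    have e2 : (n / b) % P = (n % M) / b := by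
      have hq : n / b = n % M / b + P * (n / M) := by
        calc n / b = (n % M + b * (P * (n / M))) / b := by
              congr 1; linear_combination hndecomp + (n / M) * hMP
          _ = n % M / b + P * (n / M) := Int.add_mul_ediv_left _ _ (by omega)
      rw [hq, Int.add_mul_emod_self_left]
      apply Int.emod_eq_of_lt
      · exact Int.ediv_nonneg hr0 (by omega)
      · apply Int.ediv_lt_of_lt_mul hbpos
        calc n % M < M := hrM
          _ = P * b := by rw [hMP]; ring
    -- e3 : n % b = (n % M) % b
    have e3 : n % b = (n % M) % b := by
      rw [Int.emod_emod_of_dvd n (Dvd.intro P hMP.symm)]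
    -- unfold specP once on the left
    rw [specP, if_neg (by omega : ¬ (n ≤ 0 ∨ b ≤ 1)), hIH, e1, e2, e3]
    by_cases hrz : n % M = 0
    · rw [hrz]
      rw [Int.zero_ediv, Int.zero_emod]
      have hsz : specP b 0 = 1 := by rw [specP]; simp
      simp [hsz]
    · -- unfold specP on n % M on the right
      have hrpos : 0 < n % M := by omega
      conv_rhs => rw [specP, if_neg (by omega : ¬ (n % M ≤ 0 ∨ b ≤ 1))]
      ring

-- B's peeling loop computes prod * specP when started at a power of b dominating n
lemma peelLoop_eq_specP (b : Int) (hb : 2 ≤ b) (k : Nat) :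
    ∀ n prod : Int, 0 ≤ n → n < b ^ k * b →
    peelLoop b (b ^ k) n prod = prod * specP b n := by
  induction k with
  | zero =>
    intro n prod h0 hlt
    simp only [pow_zero] at *
    rw [peelLoop, if_neg (by omega : ¬ ((1:Int) < 1 ∨ b ≤ 1))]
    have hd : PySem.Int.floordiv n 1 = n := by
      rw [PySem.Int.floordiv_eq_ediv_of_pos (by omega), Int.ediv_one]
    have hp : PySem.Int.floordiv 1 b = 0 := by
      rw [PySem.Int.floordiv_eq_ediv_of_pos (by omega)]
      exact Int.ediv_eq_zero_of_lt (by omega) (by omega)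
    simp only [hd, hp]
    rw [peelLoop, if_pos (by omega : (0:Int) < 1 ∨ b ≤ 1)]
    rw [specP_small b hb n h0 (by omega)]
    by_cases hz : n = 0 <;> simp [hz, mul_comm]
  | succ k ih =>
    intro n prod h0 hlt
    have hbpos : (0:Int) < b := by omega
    have hppos : (0:Int) < b ^ (k + 1) := pow_pos hbpos _
    rw [peelLoop, if_neg (by omega : ¬ (b ^ (k + 1) < 1 ∨ b ≤ 1))]
    have hd : PySem.Int.floordiv n (b ^ (k + 1)) = n / b ^ (k + 1) :=
      PySem.Int.floordiv_eq_ediv_of_pos hppos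
    have hpb : PySem.Int.floordiv (b ^ (k + 1)) b = b ^ k := by
      rw [PySem.Int.floordiv_eq_ediv_of_pos hbpos, pow_succ, Int.mul_ediv_cancel _ (by omega)]
    have hsub : n - n / b ^ (k + 1) * b ^ (k + 1) = n % b ^ (k + 1) := by
      rw [Int.emod_def]; ring
    simp only [hd, hpb, hsub]
    have hr0 : 0 ≤ n % b ^ (k + 1) := Int.emod_nonneg n (by omega)
    have hrlt : n % b ^ (k + 1) < b ^ k * b := by
      have := Int.emod_lt_of_pos n hppos
      calc n % b ^ (k + 1) < b ^ (k + 1) := this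
        _ = b ^ k * b := by ring
    rw [ih (n % b ^ (k + 1)) _ hr0 hrlt]
    rw [specP_split b hb k n h0 (by calc n < b ^ (k + 1) * b := hlt
          _ = b ^ (k + 1) * b := rfl)]
    by_cases hz : n / b ^ (k + 1) = 0 <;> simp [hz] <;> ring

-- the power-finding loop returns a power of b with n < result * b
lemma powLoop_spec (b : Int) (hb : 2 ≤ b) :
    ∀ (m : Nat) (n p : Int), (n - p).toNat ≤ m → 0 < p → (∃ j : Nat, p = b ^ j) →
    ∃ k : Nat, powLoop n b p = b ^ k ∧ n < b ^ k * b := by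
  intro m
  induction m with
  | zero =>
    intro n p hm hp ⟨j, hj⟩
    rw [powLoop, if_neg (by omega : ¬ (b ≤ 1 ∨ p ≤ 0))]
    have hnp : n ≤ p := by omega
    have : ¬ (p * b ≤ n) := by nlinarith
    rw [if_neg this]
    exact ⟨j, hj, by subst hj; omega⟩
  | succ m ih =>
    intro n p hm hp ⟨j, hj⟩
    rw [powLoop, if_neg (by omega : ¬ (b ≤ 1 ∨ p ≤ 0))]
    by_cases hle : p * b ≤ n
    · rw [if_pos hle]
      apply ih n (p * b) _ (by nlinarith) ⟨j + 1, by rw [hj]; ring⟩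
      have h1 : p < p * b := by nlinarith
      omega
    · rw [if_neg hle]
      exact ⟨j, hj, by subst hj; omega⟩

-- B's helper equals the abstract digit product
lemma nzdp_eq_specP (n b : Int) (h0 : 0 ≤ n) (hb : 2 ≤ b) :
    nonzeroDigitProduct n b = specP b n := by
  obtain ⟨k, hk, hlt⟩ := powLoop_spec b hb (n - 1).toNat n 1 (by omega) (by omega) ⟨0, by ring⟩
  rw [nonzeroDigitProduct, hk]
  rw [peelLoop_eq_specP b hb k n 1 h0 hlt, one_mul]

-- the plain-value step underlying PySem.List.max2?'s option fold
def mstep (m y : Int × Int) : Int × Int :=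
  if (decide (m.1 < y.1) || !decide (y.1 < m.1) && decide (m.2 < y.2)) = true then y else m

-- max2? over a nonempty list is the plain fold of mstep from its head
lemma max2_cons_foldl (t : List (Int × Int)) : ∀ x,
    PySem.List.max2? (x :: t) Prod.fst Prod.snd = some (t.foldl mstep x) := by
  induction t with
  | nil => intro x; rfl
  | cons y s ih =>
    intro x
    have h1 : PySem.List.max2? (x :: y :: s) Prod.fst Prod.snd
        = PySem.List.max2? (mstep x y :: s) Prod.fst Prod.snd := by
      unfold PySem.List.max2? mstep
      simp only [List.foldl_cons]
      split_ifs <;> rfl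
    rw [h1, ih (mstep x y), List.foldl_cons]

-- when every remaining base is larger than the state's, Python's tuple-max step
-- coincides with A's `score <= Max` replacement step
lemma sel_eq : ∀ (xs : List (Int × Int)) (st : Int × Int),
    (∀ y ∈ xs, st.2 < y.2) → xs.Pairwise (fun a c => a.2 < c.2) →
    xs.foldl mstep st = xs.foldl (fun st y => if st.1 ≤ y.1 then y else st) st := by
  intro xs
  induction xs with
  | nil => intro st _ _; rfl
  | cons x t ih =>
    intro st hlt hpw
    have hx : st.2 < x.2 := hlt x (List.mem_cons_self ..)
    rw [List.pairwise_cons] at hpw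
    have hcond : (decide (st.1 < x.1) || !decide (x.1 < st.1) && decide (st.2 < x.2)) = true
        ↔ st.1 ≤ x.1 := by
      simp only [Bool.or_eq_true, Bool.and_eq_true, Bool.not_eq_true', decide_eq_true_eq,
        decide_eq_false_iff_not]
      constructor
      · rintro (h | ⟨h, _⟩) <;> omega
      · intro h
        by_cases h' : st.1 < x.1
        · exact Or.inl h'
        · exact Or.inr ⟨by omega, hx⟩
    simp only [List.foldl_cons, mstep]
    by_cases h : st.1 ≤ x.1
    · rw [if_pos (hcond.mpr h), if_pos h]
      exact ih x hpw.1 hpw.2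
    · rw [if_neg (fun hc => h (hcond.mp hc)), if_neg h]
      apply ih st _ hpw.2
      intro y hy
      exact lt_trans hx (hpw.1 y hy)

-- ===== VERDICT (by name: the statement is the Claim_ definition above) =====
theorem solution_spec : Claim_equal_solution := by
  intro N _ hpre
  unfold Spec_solution solution solution_alt
  have hr : PySem.List.pyRange 2 10 1 = [2, 3, 4, 5, 6, 7, 8, 9] := by decide
  rw [hr]
  -- both sides over the same list of (product, base) pairs
  have hv : ∀ b : Int, 2 ≤ b → nonzeroDigitProduct N b = loopA b N 1 := by
    intro b hb
    rw [nzdp_eq_specP N b hpre hb, loopA_eq_specP_aux N.toNat b N 1 le_rfl hpre hb, one_mul]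
  have hA : ([2, 3, 4, 5, 6, 7, 8, 9] : List Int).foldl
      (fun (st : Int × Int) zin =>
        let Max := loopA zin N 1
        if st.1 ≤ Max then (Max, zin) else st) (1, 0) =
      (([2, 3, 4, 5, 6, 7, 8, 9] : List Int).map (fun z => (loopA z N 1, z))).foldl
        (fun st y => if st.1 ≤ y.1 then y else st) (1, 0) := by
    rw [List.foldl_map]
  rw [hA]
  -- B's map produces the same pair list
  have hBmap : ([2, 3, 4, 5, 6, 7, 8, 9] : List Int).map
      (fun b => (nonzeroDigitProduct N b, b)) =
      ([2, 3, 4, 5, 6, 7, 8, 9] : List Int).map (fun z => (loopA z N 1, z)) := by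
    apply List.map_congr_left
    intro b hb
    rw [hv b (by fin_cases hb <;> norm_num)]
  rw [hBmap]
  -- name the pair list: x :: t
  set x : Int × Int := (loopA 2 N 1, 2) with hxdef
  set t : List (Int × Int) := ([3, 4, 5, 6, 7, 8, 9] : List Int).map (fun z => (loopA z N 1, z))
    with htdef
  have hlist : ([2, 3, 4, 5, 6, 7, 8, 9] : List Int).map (fun z => (loopA z N 1, z)) = x :: t := by
    rw [hxdef, htdef]; simp
  rw [hlist]
  -- A side: the first step fires since 1 ≤ loopA 2 N 1
  have hx1 : (1:Int) ≤ x.1 := by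
    rw [hxdef]
    rw [loopA_eq_specP_aux N.toNat 2 N 1 le_rfl hpre (by norm_num), one_mul]
    exact specP_pos 2 N (by norm_num)
  have hAstep : (x :: t).foldl (fun st y => if st.1 ≤ y.1 then y else st) ((1:Int), (0:Int)) =
      t.foldl (fun st y => if st.1 ≤ y.1 then y else st) x := by
    simp only [List.foldl_cons]
    rw [if_pos hx1]
  rw [hAstep]
  -- B side: max2? over x :: t
  have hbases : (∀ y ∈ t, x.2 < y.2) ∧ t.Pairwise (fun a c => a.2 < c.2) := by
    constructor
    · intro y hy
      rw [htdef] at hy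
      simp only [List.mem_map, List.mem_cons, List.mem_singleton] at hy
      obtain ⟨z, hz, rfl⟩ := hy
      rw [hxdef]
      simp only [List.mem_cons, List.mem_singleton, List.not_mem_nil, or_false] at hz
      rcases hz with rfl|rfl|rfl|rfl|rfl|rfl|rfl <;> norm_num
    · rw [htdef, List.pairwise_map]
      norm_num [List.pairwise_cons]
  have hmax : PySem.List.max2? (x :: t) Prod.fst Prod.snd =
      some (t.foldl (fun st y => if st.1 ≤ y.1 then y else st) x) := by
    rw [max2_cons_foldl t x, sel_eq t x hbases.1 hbases.2]
  rw [hmax]
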